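-- pv_equiv track=rewrite | github.com/Michal1337/projects | projects/random/combinatorial_game/combinatorial_game.py | find_arytm_sqnc
-- ===== SOURCE A (Python) =====
-- def find_arytm_sqnc(idx, k):
--     for i in range(len(idx)):
--         for j in range(len(idx)):
--             r = abs(idx[i] - idx[j])
--             curr = 0
--             index = i
--             while index < len(idx):
--                 if idx[index] == idx[i] + curr * r:
--                     curr += 1
--                 if curr == k:
--                     return True
--                 index += 1
--     return False
-- ===== SOURCE B (Python) =====
-- def find_arytm_sqnc(idx, k):
--     # Longest-arithmetic-subsequence DP: for each element keep a map
--     # diff -> length of the longest arithmetic subsequence (nonnegative diff)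
--     # ending at that element.  O(n^2) instead of A's O(n^3) triple scan.
--     if k <= 0:
--         return False
--     if k == 1:
--         return len(idx) > 0
--     dp = []  # list of (value, {diff: best length ending here}), in order
--     for v in idx:
--         cur = {}
--         for u, du in reversed(dp):
--             d = v - u
--             if d >= 0:
--                 L = du.get(d, 1) + 1
--                 if L >= k:
--                     return True
--                 if L > cur.get(d, 0):
--                     cur[d] = L
--         dp.append((v, cur))
--     return False
-- ===== Notes on version B (the rewrite author's own statement) =====
-- stated objective: faster
-- what changed: Replaces A's triple nested scan (every start i, every pair j for a candidate difference, then a greedy rescan of the list) by the standard longest-arithmetic-subsequence dynamic programme: one left-to-right pass keeping, per element, a map from nonnegative difference to the best chain length ending there, with thresholds k<=0 and k==1 handled directly.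
import Mathlib
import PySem

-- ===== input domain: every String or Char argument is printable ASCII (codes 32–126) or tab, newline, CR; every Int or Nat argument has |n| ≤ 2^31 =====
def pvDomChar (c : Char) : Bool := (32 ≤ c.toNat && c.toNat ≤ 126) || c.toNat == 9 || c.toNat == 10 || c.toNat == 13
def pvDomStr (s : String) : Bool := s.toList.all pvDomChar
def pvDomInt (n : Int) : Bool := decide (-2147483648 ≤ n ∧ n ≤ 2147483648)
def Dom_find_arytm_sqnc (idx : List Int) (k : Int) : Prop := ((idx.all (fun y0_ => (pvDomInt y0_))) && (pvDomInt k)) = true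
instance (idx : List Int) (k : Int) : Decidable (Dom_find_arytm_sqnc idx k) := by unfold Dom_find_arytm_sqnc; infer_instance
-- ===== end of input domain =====

-- B replaces A's O(n^3) triple scan by the O(n^2) longest-arithmetic-subsequence
-- dynamic programme (per-element map: nonnegative difference -> best chain length).

-- ===== PORT A =====
-- Python's inner `while index < len(idx)` loop; every index used is a Nat < len(idx),
-- so `getD _ 0` is exact here (no IndexError is reachable).
def pvWhileA (idx : List Int) (k base r : Int) (curr : Int) (index : Nat) : Bool :=
  if _h : index < idx.length then
    let curr' := if idx.getD index 0 = base + curr * r then curr + 1 else curr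
    if curr' = k then true
    else pvWhileA idx k base r curr' (index + 1)
  else false
termination_by idx.length - index
decreasing_by omega

def find_arytm_sqnc (idx : List Int) (k : Int) : Bool :=
  (List.range idx.length).any fun i =>
    (List.range idx.length).any fun j =>
      pvWhileA idx k (idx.getD i 0) |idx.getD i 0 - idx.getD j 0| 0 i

-- ===== PORT B =====
-- Source B iterates `for u, du in reversed(dp)` where dp is appended at the end;
-- the port keeps dp already reversed (cons instead of append) and walks it
-- front-to-back — the same traversal, element for element.
def pvInnerB (k v : Int) : List (Int × PySem.Dict Int Int) → PySem.Dict Int Int → Option (PySem.Dict Int Int)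
  | [], cur => some cur
  | (u, du) :: rest, cur =>
    let d := v - u
    if 0 ≤ d then
      let L := du.getD d 1 + 1
      if k ≤ L then none
      else if cur.getD d 0 < L then pvInnerB k v rest (cur.insert d L)
      else pvInnerB k v rest cur
    else pvInnerB k v rest cur

def pvOuterB (k : Int) : List Int → List (Int × PySem.Dict Int Int) → Bool
  | [], _ => false
  | v :: vs, dp =>
    match pvInnerB k v dp PySem.Dict.empty with
    | none => true
    | some cur => pvOuterB k vs ((v, cur) :: dp)

def find_arytm_sqnc_alt (idx : List Int) (k : Int) : Bool :=
  if k ≤ 0 then false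
  else if k = 1 then decide (0 < idx.length)
  else pvOuterB k idx []

-- ===== PRECONDITION & SPEC =====
def Spec_find_arytm_sqnc (idx : List Int) (k : Int) (out : Bool) : Prop := out = find_arytm_sqnc_alt idx k
instance (idx : List Int) (k : Int) (out : Bool) : Decidable (Spec_find_arytm_sqnc idx k out) := by unfold Spec_find_arytm_sqnc; infer_instance

-- ===== CLAIM (what is proved, stated in full; the proofs are below) =====
def Claim_equal_find_arytm_sqnc : Prop := ∀ (idx : List Int) (k : Int), Dom_find_arytm_sqnc idx k → Spec_find_arytm_sqnc idx k (find_arytm_sqnc idx k)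

-- ===== LEMMAS AND PROOFS =====

-- the value pattern a, a+d, ..., a+(m-1)d of an arithmetic subsequence
def pvT (a d : Int) (m : Nat) : List Int := (List.range m).map (fun (t : Nat) => a + (t : Int) * d)

-- longest arithmetic chain with difference d ending with v appended after the
-- (reversed) prefix rl; pvCmax is the same but 0 when no element of rl is used
def pvChain : List Int → Int → Int → Int
  | [], _, _ => 1
  | u :: rest, v, d => if v - u = d then max (pvChain rest u d + 1) (pvChain rest v d) else pvChain rest v d

def pvCmax : List Int → Int → Int → Int
  | [], _, _ => 0
  | u :: rest, v, d => if v - u = d then max (pvChain rest u d + 1) (pvCmax rest v d) else pvCmax rest v d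

-- the common meaning of both programs
def pvS (idx : List Int) (k : Int) : Prop :=
  1 ≤ k ∧ ∃ a d : Int, 0 ≤ d ∧ List.Sublist (pvT a d k.toNat) idx

-- invariant of B's dp list (most recent element first)
def pvInv : List (Int × PySem.Dict Int Int) → Prop
  | [] => True
  | (u, du) :: rest =>
      (∀ x w, du.get? x = some w → 2 ≤ w) ∧
      (∀ x : Int, 0 ≤ x → du.getD x 1 = pvChain (rest.map Prod.fst) u x) ∧
      pvInv rest

lemma pvChain_pos (rl : List Int) (v d : Int) : 1 ≤ pvChain rl v d := by
  induction rl generalizing v with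
  | nil => simp [pvChain]
  | cons u rest ih =>
    simp only [pvChain]
    split
    · have := ih u; have := ih v; omega
    · exact ih v

lemma pvCmax_nonneg (rl : List Int) (v d : Int) : 0 ≤ pvCmax rl v d := by
  induction rl generalizing v with
  | nil => simp [pvCmax]
  | cons u rest ih =>
    simp only [pvCmax]
    split
    · have := pvChain_pos rest u d; have := ih v; omega
    · exact ih v

lemma pvChain_eq (rl : List Int) (v d : Int) : pvChain rl v d = max 1 (pvCmax rl v d) := by
  induction rl generalizing v with
  | nil => simp [pvChain, pvCmax]
  | cons u rest ih =>
    simp only [pvChain, pvCmax]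
    split
    · have := ih v; have := pvChain_pos rest u d; omega
    · exact ih v

lemma pvT_succ (a d : Int) (m : Nat) : pvT a d (m + 1) = a :: pvT (a + d) d m := by
  apply List.ext_getElem
  · simp [pvT]
  · intro i h1 h2
    cases i with
    | zero =>
      simp only [pvT, List.getElem_map, List.getElem_range, List.getElem_cons_zero]
      push_cast; ring
    | succ j =>
      simp only [pvT, List.getElem_map, List.getElem_range, List.getElem_cons_succ]
      push_cast; ring

lemma pvT_succ_last (a d : Int) (m : Nat) : pvT a d (m + 1) = pvT a d m ++ [a + m * d] := by
  simp [pvT, List.range_succ]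

-- sublist decompositions
lemma pv_cons_sublist_decomp {a : Int} {l L : List Int} (h : List.Sublist (a :: l) L) :
    ∃ p s, L = p ++ a :: s ∧ List.Sublist l s := by
  rcases List.cons_sublist_iff.mp h with ⟨r₁, r₂, rfl, ha, hl⟩
  rcases List.append_of_mem ha with ⟨p, s', rfl⟩
  exact ⟨p, s' ++ r₂, by simp, hl.trans (List.sublist_append_right _ _)⟩

lemma pv_snoc_sublist_decomp {v : Int} {l L : List Int} (h : List.Sublist (l ++ [v]) L) :
    ∃ p s, L = p ++ v :: s ∧ List.Sublist l p := by
  rcases List.append_sublist_iff.mp h with ⟨r₁, r₂, rfl, hl, hv⟩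
  have hm : v ∈ r₂ := (List.singleton_sublist.mp hv)
  rcases List.append_of_mem hm with ⟨p', s, rfl⟩
  exact ⟨r₁ ++ p', s, by simp, hl.trans (List.sublist_append_left _ _)⟩

lemma pv_sublist_snoc_cases {l M : List Int} {u : Int} (h : List.Sublist l (M ++ [u])) :
    List.Sublist l M ∨ ∃ l', l = l' ++ [u] ∧ List.Sublist l' M := by
  rcases List.sublist_append_iff.mp h with ⟨l₁, l₂, rfl, h₁, h₂⟩
  rcases List.sublist_singleton.mp h₂ with rfl | rfl
  · exact Or.inl (by simpa using h₁)
  · exact Or.inr ⟨l₁, rfl, h₁⟩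

lemma pv_cons_sublist_of_ne {a x : Int} {l L : List Int}
    (h : List.Sublist (a :: l) (x :: L)) (hne : a ≠ x) : List.Sublist (a :: l) L := by
  rcases List.sublist_cons_iff.mp h with h' | ⟨r, hr, _⟩
  · exact h'
  · exfalso
    injection hr with h1 _
    exact hne h1

-- chain ↔ pattern-sublist
lemma pvChain_ge_iff (rl : List Int) (v d : Int) (c : Nat) :
    ((c : Int) + 1 ≤ pvChain rl v d) ↔ List.Sublist (pvT (v - c * d) d c) rl.reverse := by
  induction rl generalizing v c with
  | nil =>
    cases c with
    | zero => simp [pvChain, pvT]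
    | succ c' =>
      constructor
      · intro h
        simp only [pvChain] at h
        exfalso
        push_cast at h
        omega
      · intro h
        rw [pvT_succ] at h
        simp at h
  | cons u rest ih =>
    cases c with
    | zero =>
      simp only [Nat.cast_zero, zero_add, pvT, List.range_zero, List.map_nil]
      simpa using pvChain_pos (u :: rest) v d
    | succ c' =>
      simp only [List.reverse_cons, pvChain]
      split
      · rename_i hud
        have hu : u = v - d := by omega
        have hsplit : ((↑(c' + 1) : Int) + 1 ≤ max (pvChain rest u d + 1) (pvChain rest v d)) ↔
            (((c' : Int) + 1 ≤ pvChain rest u d) ∨ ((↑(c' + 1) : Int) + 1 ≤ pvChain rest v d)) := by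
          push_cast
          omega
        have hA : v - (↑(c' + 1) : Int) * d = u - ↑c' * d := by
          rw [hu]; push_cast; ring
        have hlast : pvT (v - (↑(c' + 1) : Int) * d) d (c' + 1) = pvT (u - ↑c' * d) d c' ++ [u] := by
          rw [pvT_succ_last, hA]
          have : u - ↑c' * d + ↑c' * d = u := by ring
          rw [this]
        rw [hlast]
        constructor
        · intro hle
          rcases hsplit.mp hle with h1 | h2
          · exact List.Sublist.append ((ih u c').mp h1) (List.Sublist.refl _)
          · have h3 := (ih v (c' + 1)).mp h2
            rw [hlast] at h3
            exact h3.trans (List.sublist_append_left rest.reverse [u])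
        · intro hsub
          rcases pv_sublist_snoc_cases hsub with h1 | ⟨l', hl', h2⟩
          · have h3 := (ih v (c' + 1)).mpr (by rw [hlast]; exact h1)
            exact hsplit.mpr (Or.inr h3)
          · have hl'' : l' = pvT (u - ↑c' * d) d c' := by
              have hd' := congrArg List.dropLast hl'
              simpa using hd'.symm
            subst hl''
            exact hsplit.mpr (Or.inl ((ih u c').mpr h2))
      · rename_i hud
        have hu : u ≠ v - d := by omega
        have hlast : pvT (v - (↑(c' + 1) : Int) * d) d (c' + 1) = pvT (v - (↑(c' + 1) : Int) * d) d c' ++ [v - d] := by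
          rw [pvT_succ_last]
          have : v - (↑(c' + 1) : Int) * d + ↑c' * d = v - d := by push_cast; ring
          rw [this]
        constructor
        · intro hle
          have h3 := (ih v (c' + 1)).mp hle
          exact h3.trans (List.sublist_append_left rest.reverse [u])
        · intro hsub
          rw [hlast] at hsub
          rcases pv_sublist_snoc_cases hsub with h1 | ⟨l', hl', _⟩
          · exact (ih v (c' + 1)).mpr (by rw [hlast]; exact h1)
          · exfalso
            have hlastel := congrArg List.getLast? hl'
            simp at hlastel
            exact hu hlastel.symm

-- ----- A side -----
lemma pvWhileA_sound (idx : List Int) (k b r : Int) :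
    ∀ n index curr, idx.length - index ≤ n → pvWhileA idx k b r curr index = true →
      curr ≤ k ∧ List.Sublist (pvT (b + curr * r) r (k - curr).toNat) (idx.drop index) := by
  intro n
  induction n with
  | zero =>
    intro index curr hn ht
    rw [pvWhileA] at ht
    rw [dif_neg (by omega)] at ht
    exact absurd ht (by simp)
  | succ n ih =>
    intro index curr hn ht
    rw [pvWhileA] at ht
    by_cases hlt : index < idx.length
    · rw [dif_pos hlt] at ht
      simp only at ht
      rw [List.drop_eq_getElem_cons hlt]
      by_cases hmatch : idx.getD index 0 = b + curr * r
      · rw [if_pos hmatch] at ht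
        by_cases hk : curr + 1 = k
        · refine ⟨by omega, ?_⟩
          have h1 : (k - curr).toNat = 1 := by omega
          rw [h1]
          have : pvT (b + curr * r) r 1 = [b + curr * r] := by simp [pvT]
          rw [this, ← hmatch, List.getD_eq_getElem idx 0 hlt]
          exact (List.nil_sublist _).cons₂ _
        · rw [if_neg hk] at ht
          obtain ⟨hle, hsub⟩ := ih (index + 1) (curr + 1) (by omega) ht
          refine ⟨by omega, ?_⟩
          have h2 : (k - curr).toNat = (k - (curr + 1)).toNat + 1 := by omega
          rw [h2, pvT_succ]
          have hhd : idx[index] = b + curr * r := by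
            rw [← List.getD_eq_getElem idx 0 hlt]; exact hmatch
          rw [hhd]
          refine List.Sublist.cons₂ _ ?_
          have : b + curr * r + r = b + (curr + 1) * r := by ring
          rw [this]; exact hsub
      · rw [if_neg hmatch] at ht
        by_cases hk : curr = k
        · refine ⟨le_of_eq hk, ?_⟩
          have h0 : (k - curr).toNat = 0 := by omega
          simp [h0, pvT]
        · rw [if_neg hk] at ht
          obtain ⟨hle, hsub⟩ := ih (index + 1) curr (by omega) ht
          exact ⟨hle, hsub.trans (List.sublist_cons_self _ _)⟩
    · rw [dif_neg hlt] at ht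
      exact absurd ht (by simp)

lemma pvWhileA_complete (idx : List Int) (k b r : Int) :
    ∀ n index curr, idx.length - index ≤ n → curr < k →
      List.Sublist (pvT (b + curr * r) r (k - curr).toNat) (idx.drop index) →
      pvWhileA idx k b r curr index = true := by
  intro n
  induction n with
  | zero =>
    intro index curr hn hck hsub
    exfalso
    have hdrop : idx.drop index = [] := List.drop_eq_nil_of_le (by omega)
    rw [hdrop] at hsub
    have hm : (k - curr).toNat = ((k - curr).toNat - 1) + 1 := by omega
    rw [hm, pvT_succ] at hsub
    simp at hsub
  | succ n ih =>
    intro index curr hn hck hsub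
    by_cases hlt : index < idx.length
    · rw [pvWhileA, dif_pos hlt]
      simp only
      rw [List.drop_eq_getElem_cons hlt] at hsub
      by_cases hmatch : idx.getD index 0 = b + curr * r
      · rw [if_pos hmatch]
        by_cases hk : curr + 1 = k
        · rw [if_pos hk]
        · rw [if_neg hk]
          refine ih (index + 1) (curr + 1) (by omega) (by omega) ?_
          have h2 : (k - curr).toNat = (k - (curr + 1)).toNat + 1 := by omega
          rw [h2, pvT_succ] at hsub
          have hhd : idx[index] = b + curr * r := by
            rw [← List.getD_eq_getElem idx 0 hlt]; exact hmatch
          rw [hhd] at hsub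
          have : b + curr * r + r = b + (curr + 1) * r := by ring
          rw [this] at hsub
          exact List.cons_sublist_cons.mp hsub
      · rw [if_neg hmatch, if_neg (by omega)]
        refine ih (index + 1) curr (by omega) hck ?_
        have hm : (k - curr).toNat = ((k - curr).toNat - 1) + 1 := by omega
        rw [hm, pvT_succ] at hsub ⊢
        refine pv_cons_sublist_of_ne hsub ?_
        intro he
        rw [← List.getD_eq_getElem idx 0 hlt] at he
        exact hmatch he.symm
    · exfalso
      have hdrop : idx.drop index = [] := List.drop_eq_nil_of_le (by omega)
      rw [hdrop] at hsub
      have hm : (k - curr).toNat = ((k - curr).toNat - 1) + 1 := by omega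
      rw [hm, pvT_succ] at hsub
      simp at hsub

lemma pvA_iff (idx : List Int) (k : Int) : find_arytm_sqnc idx k = true ↔ pvS idx k := by
  simp only [find_arytm_sqnc, List.any_eq_true, List.mem_range]
  constructor
  · rintro ⟨i, hi, j, hj, ht⟩
    rw [pvWhileA, dif_pos hi] at ht
    simp only at ht
    have hmatch : idx.getD i 0 = idx.getD i 0 + 0 * |idx.getD i 0 - idx.getD j 0| := by ring
    rw [if_pos hmatch] at ht
    by_cases hk : (0 : Int) + 1 = k
    · refine ⟨by omega, idx.getD i 0, 0, le_refl _, ?_⟩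
      have h1 : k.toNat = 1 := by omega
      rw [h1]
      have : pvT (idx.getD i 0) 0 1 = [idx.getD i 0] := by simp [pvT]
      rw [this, List.singleton_sublist, List.getD_eq_getElem idx 0 hi]
      exact List.getElem_mem hi
    · rw [if_neg hk] at ht
      obtain ⟨hle, hsub⟩ := pvWhileA_sound idx k (idx.getD i 0) _ idx.length (i + 1) 1 (by omega) ht
      refine ⟨by omega, idx.getD i 0, |idx.getD i 0 - idx.getD j 0|, abs_nonneg _, ?_⟩
      have h2 : k.toNat = (k - 1).toNat + 1 := by omega
      rw [h2, pvT_succ]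
      have hdi : idx.drop i = idx.getD i 0 :: idx.drop (i + 1) := by
        rw [List.drop_eq_getElem_cons hi, List.getD_eq_getElem idx 0 hi]
      have hstep : List.Sublist (idx.getD i 0 :: pvT (idx.getD i 0 + |idx.getD i 0 - idx.getD j 0|) |idx.getD i 0 - idx.getD j 0| (k - 1).toNat) (idx.drop i) := by
        rw [hdi]
        refine List.Sublist.cons₂ _ ?_
        have he : idx.getD i 0 + |idx.getD i 0 - idx.getD j 0| = idx.getD i 0 + 1 * |idx.getD i 0 - idx.getD j 0| := by ring
        rw [he]
        exact hsub
      exact hstep.trans (List.drop_sublist i idx)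
  · rintro ⟨hk1, a, d, hd, hsub⟩
    have hm : k.toNat = (k.toNat - 1) + 1 := by omega
    rw [hm, pvT_succ] at hsub
    obtain ⟨p, s, hidx, hts⟩ := pv_cons_sublist_decomp hsub
    have hi : p.length < idx.length := by
      rw [hidx]; simp
    have hgi : idx.getD p.length 0 = a := by
      rw [hidx]
      rw [List.getD_eq_getElem (p ++ a :: s) 0 (by simp)]
      simp
    have hdropi : idx.drop p.length = a :: s := by
      rw [hidx, List.drop_left]
    by_cases hk2 : k = 1
    · refine ⟨p.length, hi, p.length, hi, ?_⟩
      refine pvWhileA_complete idx k _ _ idx.length p.length 0 (by omega) (by omega) ?_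
      rw [hgi]
      have h1 : (k - 0).toNat = 1 := by omega
      rw [h1]
      have habs : |a - a| = (0 : Int) := by simp
      have : pvT (a + 0 * |a - a|) |a - a| 1 = [a] := by simp [pvT]
      rw [this, hdropi]
      exact (List.nil_sublist _).cons₂ _
    · -- k ≥ 2 : the second pattern element a + d occurs in idx, giving j
      have hk2' : 2 ≤ k := by omega
      have hm2 : k.toNat - 1 = (k.toNat - 2) + 1 := by omega
      have hmem : a + d ∈ idx := by
        have : a + d ∈ pvT (a + d) d (k.toNat - 1) := by
          rw [hm2, pvT_succ]; exact List.mem_cons_self ..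
        have h2 := (hts.subset this)
        rw [hidx]
        exact List.mem_append_right _ (List.mem_cons_of_mem _ h2)
      obtain ⟨j, hj, hgj⟩ := List.mem_iff_getElem.mp hmem
      refine ⟨p.length, hi, j, hj, ?_⟩
      refine pvWhileA_complete idx k _ _ idx.length p.length 0 (by omega) (by omega) ?_
      rw [hgi]
      have hgj' : idx.getD j 0 = a + d := by rw [List.getD_eq_getElem idx 0 hj]; exact hgj
      rw [hgj']
      have habs : |a - (a + d)| = d := by
        have : a - (a + d) = -d := by ring
        rw [this, abs_neg, abs_of_nonneg hd]
      rw [habs]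
      have h0 : (k - 0).toNat = (k.toNat - 1) + 1 := by omega
      rw [h0]
      have he : pvT (a + 0 * d) d ((k.toNat - 1) + 1) = a :: pvT (a + d) d (k.toNat - 1) := by
        have : a + 0 * d = a := by ring
        rw [this, pvT_succ]
      rw [he, hdropi]
      exact List.Sublist.cons₂ _ hts

-- ----- B side -----
lemma pvDok (du : PySem.Dict Int Int) (h : ∀ x w, du.get? x = some w → 2 ≤ w) (x : Int) :
    du.getD x 1 = max 1 (du.getD x 0) := by
  rw [PySem.Dict.getD_eq_get?_getD, PySem.Dict.getD_eq_get?_getD]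
  cases hg : du.get? x with
  | none => simp
  | some w => have := h x w hg; simp; omega

lemma pvGetD_nonneg (du : PySem.Dict Int Int) (h : ∀ x w, du.get? x = some w → 2 ≤ w) (x : Int) :
    0 ≤ du.getD x 0 := by
  rw [PySem.Dict.getD_eq_get?_getD]
  cases hg : du.get? x with
  | none => simp
  | some w => have := h x w hg; simp; omega

lemma pvInnerB_some (k v : Int) :
    ∀ (dp : List (Int × PySem.Dict Int Int)) (cur cur' : PySem.Dict Int Int),
      pvInv dp → (∀ x w, cur.get? x = some w → 2 ≤ w) →
      pvInnerB k v dp cur = some cur' →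
      (∀ x w, cur'.get? x = some w → 2 ≤ w) ∧
      (∀ x : Int, 0 ≤ x → cur'.getD x 0 = max (cur.getD x 0) (pvCmax (dp.map Prod.fst) v x)) := by
  intro dp
  induction dp with
  | nil =>
    intro cur cur' _ hcur hsome
    simp only [pvInnerB, Option.some.injEq] at hsome
    subst hsome
    refine ⟨hcur, fun x hx => ?_⟩
    simp only [List.map_nil, pvCmax]
    have := pvGetD_nonneg cur hcur x
    omega
  | cons p rest ih =>
    obtain ⟨u, du⟩ := p
    intro cur cur' hinv hcur hsome
    obtain ⟨hval, hchain, hinv'⟩ := hinv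
    simp only [pvInnerB] at hsome
    simp only [List.map_cons, pvCmax]
    by_cases hd : 0 ≤ v - u
    · rw [if_pos hd] at hsome
      have hL : du.getD (v - u) 1 = pvChain (rest.map Prod.fst) u (v - u) := hchain _ hd
      have hLpos : 1 ≤ du.getD (v - u) 1 := by
        rw [hL]; exact pvChain_pos _ _ _
      by_cases hkL : k ≤ du.getD (v - u) 1 + 1
      · rw [if_pos hkL] at hsome; exact absurd hsome (by simp)
      · rw [if_neg hkL] at hsome
        by_cases hins : cur.getD (v - u) 0 < du.getD (v - u) 1 + 1
        · rw [if_pos hins] at hsome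
          have hcur2 : ∀ x w, (cur.insert (v - u) (du.getD (v - u) 1 + 1)).get? x = some w → 2 ≤ w := by
            intro x w hg
            rw [PySem.Dict.get?_insert] at hg
            split at hg
            · cases hg; omega
            · exact hcur x w hg
          obtain ⟨h1, h2⟩ := ih _ _ hinv' hcur2 hsome
          refine ⟨h1, fun x hx => ?_⟩
          rw [h2 x hx, PySem.Dict.getD_insert]
          by_cases hxd : x = v - u
          · subst hxd
            rw [if_pos rfl, if_pos (by omega), hL]
            omega
          · rw [if_neg hxd, if_neg (by omega)]
        · rw [if_neg hins] at hsome
          obtain ⟨h1, h2⟩ := ih _ _ hinv' hcur hsome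
          refine ⟨h1, fun x hx => ?_⟩
          rw [h2 x hx]
          by_cases hxd : x = v - u
          · subst hxd
            rw [if_pos (by omega)]
            rw [hL] at hins
            omega
          · rw [if_neg (by omega)]
    · rw [if_neg hd] at hsome
      obtain ⟨h1, h2⟩ := ih _ _ hinv' hcur hsome
      refine ⟨h1, fun x hx => ?_⟩
      rw [h2 x hx, if_neg (by omega)]

lemma pvInnerB_none_sound (k v : Int) :
    ∀ (dp : List (Int × PySem.Dict Int Int)) (cur : PySem.Dict Int Int),
      pvInv dp → pvInnerB k v dp cur = none →
      ∃ x : Int, 0 ≤ x ∧ k ≤ pvCmax (dp.map Prod.fst) v x := by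
  intro dp
  induction dp with
  | nil => intro cur _ h; simp [pvInnerB] at h
  | cons p rest ih =>
    obtain ⟨u, du⟩ := p
    intro cur hinv hnone
    obtain ⟨hval, hchain, hinv'⟩ := hinv
    simp only [pvInnerB] at hnone
    simp only [List.map_cons, pvCmax]
    by_cases hd : 0 ≤ v - u
    · rw [if_pos hd] at hnone
      have hL : du.getD (v - u) 1 = pvChain (rest.map Prod.fst) u (v - u) := hchain _ hd
      by_cases hkL : k ≤ du.getD (v - u) 1 + 1
      · refine ⟨v - u, hd, ?_⟩
        rw [if_pos rfl]
        rw [hL] at hkL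
        omega
      · rw [if_neg hkL] at hnone
        have hrec : ∃ x, 0 ≤ x ∧ k ≤ pvCmax (rest.map Prod.fst) v x := by
          by_cases hins : cur.getD (v - u) 0 < du.getD (v - u) 1 + 1
          · rw [if_pos hins] at hnone; exact ih _ hinv' hnone
          · rw [if_neg hins] at hnone; exact ih _ hinv' hnone
        obtain ⟨x, hx, hcm⟩ := hrec
        refine ⟨x, hx, ?_⟩
        split
        · omega
        · omega
    · rw [if_neg hd] at hnone
      obtain ⟨x, hx, hcm⟩ := ih _ hinv' hnone
      refine ⟨x, hx, ?_⟩
      rw [if_neg (by omega)]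
      exact hcm

lemma pvInnerB_none_complete (k v : Int) (hk : 2 ≤ k) :
    ∀ (dp : List (Int × PySem.Dict Int Int)) (cur : PySem.Dict Int Int),
      pvInv dp → (∃ x : Int, 0 ≤ x ∧ k ≤ pvCmax (dp.map Prod.fst) v x) →
      pvInnerB k v dp cur = none := by
  intro dp
  induction dp with
  | nil =>
    intro cur _ ⟨x, _, hcm⟩
    simp only [List.map_nil, pvCmax] at hcm
    omega
  | cons p rest ih =>
    obtain ⟨u, du⟩ := p
    intro cur hinv ⟨x, hx, hcm⟩
    obtain ⟨hval, hchain, hinv'⟩ := hinv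
    simp only [List.map_cons, pvCmax] at hcm
    simp only [pvInnerB]
    by_cases hxd : v - u = x
    · rw [if_pos hxd] at hcm
      have hd : 0 ≤ v - u := by omega
      rw [if_pos hd]
      have hL : du.getD (v - u) 1 = pvChain (rest.map Prod.fst) u (v - u) := hchain _ hd
      by_cases hkL : k ≤ du.getD (v - u) 1 + 1
      · rw [if_pos hkL]
      · rw [if_neg hkL]
        have hrest : k ≤ pvCmax (rest.map Prod.fst) v x := by
          rw [hL, hxd] at hkL
          omega
        by_cases hins : cur.getD (v - u) 0 < du.getD (v - u) 1 + 1
        · rw [if_pos hins]; exact ih _ hinv' ⟨x, hx, hrest⟩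
        · rw [if_neg hins]; exact ih _ hinv' ⟨x, hx, hrest⟩
    · rw [if_neg hxd] at hcm
      by_cases hd : 0 ≤ v - u
      · rw [if_pos hd]
        by_cases hkL : k ≤ du.getD (v - u) 1 + 1
        · rw [if_pos hkL]
        · rw [if_neg hkL]
          by_cases hins : cur.getD (v - u) 0 < du.getD (v - u) 1 + 1
          · rw [if_pos hins]; exact ih _ hinv' ⟨x, hx, hcm⟩
          · rw [if_neg hins]; exact ih _ hinv' ⟨x, hx, hcm⟩
      · rw [if_neg hd]
        exact ih _ hinv' ⟨x, hx, hcm⟩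

lemma pvOuterB_iff (k : Int) (hk : 2 ≤ k) :
    ∀ (vs : List Int) (dp : List (Int × PySem.Dict Int Int)), pvInv dp →
      (pvOuterB k vs dp = true ↔
        ∃ p v s, vs = p ++ v :: s ∧ ∃ x : Int, 0 ≤ x ∧
          k ≤ pvChain (p.reverse ++ dp.map Prod.fst) v x) := by
  intro vs
  induction vs with
  | nil =>
    intro dp _
    simp only [pvOuterB]
    constructor
    · intro h; simp at h
    · rintro ⟨p, v, s, hps, _⟩
      exact absurd hps (by simp)
  | cons v vs' ih =>
    intro dp hinv
    simp only [pvOuterB]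
    cases hrun : pvInnerB k v dp PySem.Dict.empty with
    | none =>
      simp only
      constructor
      · intro _
        obtain ⟨x, hx, hcm⟩ := pvInnerB_none_sound k v dp _ hinv hrun
        refine ⟨[], v, vs', rfl, x, hx, ?_⟩
        rw [List.reverse_nil, List.nil_append, pvChain_eq]
        omega
      · intro _; trivial
    | some cur =>
      simp only
      have hcur0 : ∀ x w, (PySem.Dict.empty : PySem.Dict Int Int).get? x = some w → 2 ≤ w := by
        intro x w hg
        rw [PySem.Dict.get?_empty] at hg
        cases hg
      obtain ⟨hval, hgd⟩ := pvInnerB_some k v dp _ _ hinv hcur0 hrun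
      have hinv2 : pvInv ((v, cur) :: dp) := by
        refine ⟨hval, fun x hx => ?_, hinv⟩
        rw [pvDok cur hval x, hgd x hx, PySem.Dict.getD_empty, pvChain_eq]
        have := pvCmax_nonneg (dp.map Prod.fst) v x
        omega
      rw [ih _ hinv2]
      constructor
      · rintro ⟨p', v', s', hps, x, hx, hc⟩
        refine ⟨v :: p', v', s', by rw [hps, List.cons_append], x, hx, ?_⟩
        simpa [List.append_assoc] using hc
      · rintro ⟨p, v0, s, hps, x, hx, hc⟩
        cases p with
        | nil =>
          exfalso
          simp only [List.nil_append, List.cons.injEq] at hps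
          obtain ⟨hv, hs⟩ := hps
          subst hv
          subst hs
          rw [List.reverse_nil, List.nil_append, pvChain_eq] at hc
          have hcm : k ≤ pvCmax (dp.map Prod.fst) v x := by omega
          have := pvInnerB_none_complete k v hk dp PySem.Dict.empty hinv ⟨x, hx, hcm⟩
          rw [this] at hrun
          cases hrun
        | cons w p' =>
          simp only [List.cons_append, List.cons.injEq] at hps
          obtain ⟨rfl, hvs⟩ := hps
          refine ⟨p', v0, s, hvs, x, hx, ?_⟩
          simpa [List.append_assoc] using hc

lemma pvB_iff (idx : List Int) (k : Int) : find_arytm_sqnc_alt idx k = true ↔ pvS idx k := by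
  unfold find_arytm_sqnc_alt
  by_cases hk0 : k ≤ 0
  · rw [if_pos hk0]
    simp only [Bool.false_eq_true, false_iff, pvS]
    rintro ⟨h, _⟩; omega
  · rw [if_neg hk0]
    by_cases hk1 : k = 1
    · rw [if_pos hk1]
      subst hk1
      simp only [decide_eq_true_eq, pvS]
      constructor
      · intro hlen
        have hne : idx ≠ [] := by
          cases idx with
          | nil => simp at hlen
          | cons a l => simp
        obtain ⟨a, ha⟩ := List.exists_mem_of_ne_nil idx hne
        refine ⟨le_refl _, a, 0, le_refl _, ?_⟩
        have : pvT a 0 (1 : Int).toNat = [a] := by simp [pvT]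
        rw [this, List.singleton_sublist]
        exact ha
      · rintro ⟨_, a, d, _, hsub⟩
        have : pvT a d (1 : Int).toNat = [a + 0 * d] := by simp [pvT]
        rw [this, List.singleton_sublist] at hsub
        exact List.length_pos_of_mem hsub
    · rw [if_neg hk1]
      have hk2 : 2 ≤ k := by omega
      rw [pvOuterB_iff k hk2 idx [] trivial]
      simp only [List.map_nil, List.append_nil]
      unfold pvS
      constructor
      · rintro ⟨p, v, s, hps, x, hx, hc⟩
        obtain ⟨c, hc1, hc2⟩ : ∃ c : Nat, k.toNat = c + 1 ∧ ((c : Int) + 1 = k) :=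
          ⟨k.toNat - 1, by omega, by omega⟩
        refine ⟨by omega, v - (c : Int) * x, x, hx, ?_⟩
        have hc' : (c : Int) + 1 ≤ pvChain p.reverse v x := by omega
        have hsubp := (pvChain_ge_iff p.reverse v x c).mp hc'
        rw [List.reverse_reverse] at hsubp
        rw [hc1, pvT_succ_last]
        have hlast : v - (c : Int) * x + (c : Int) * x = v := by ring
        rw [hlast, hps]
        exact List.Sublist.append hsubp (List.singleton_sublist.mpr (List.mem_cons_self ..))
      · rintro ⟨_, a, d, hd, hsub⟩
        obtain ⟨c, hc1, hc2⟩ : ∃ c : Nat, k.toNat = c + 1 ∧ ((c : Int) + 1 = k) :=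
          ⟨k.toNat - 1, by omega, by omega⟩
        rw [hc1, pvT_succ_last] at hsub
        obtain ⟨p, s, hps, hsubp⟩ := pv_snoc_sublist_decomp hsub
        refine ⟨p, a + (c : Int) * d, s, hps, d, hd, ?_⟩
        have heq : pvT (a + (c : Int) * d - (c : Int) * d) d c = pvT a d c := by
          congr 1
          ring
        have hle := (pvChain_ge_iff p.reverse (a + (c : Int) * d) d c).mpr
          (by rw [List.reverse_reverse, heq]; exact hsubp)
        omega

-- ===== VERDICT (by name: the statement is the Claim_ definition above) =====
theorem find_arytm_sqnc_spec : Claim_equal_find_arytm_sqnc := by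
  intro idx k _
  unfold Spec_find_arytm_sqnc
  rw [Bool.eq_iff_iff, pvA_iff, pvB_iff]
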